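-- pv_equiv track=rewrite | github.com/Adminixtrator/resume-parser--NLP--Spacy | main.py | checkReadability
-- ===== SOURCE A (Python) =====
-- def checkReadability(text):
--     try:
--         exp = [True for i in text.splitlines() if 'experience' in i.lower().split(" ") or 'projects' in i.lower().split(" ") and len(i.lower().split(" ")) <= 2][0]
--     except IndexError:
--         exp = False
--     try:
--         edu = [True for i in text.splitlines() if 'education' in i.lower().split(" ") or 'certifications' in i.lower().split(" ") and len(i.lower().split(" ")) == 1][0]
--     except IndexError:
--         edu = False
--     try:
--         sumr = [True for i in text.splitlines() if 'summary' in i.lower().split(" ") and len(i.lower().split(" ")) <= 2][0]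
--     except IndexError:
--         sumr = False
--     if exp is False or edu is False or sumr is False:
--         return False
--     else:
--         return True
-- ===== SOURCE B (Python) =====
-- def checkReadability(text):
--     exp = edu = sumr = False
--     for line in text.splitlines():
--         words = line.lower().split(" ")
--         if 'experience' in words or ('projects' in words and len(words) <= 2):
--             exp = True
--         if 'education' in words or ('certifications' in words and len(words) == 1):
--             edu = True
--         if 'summary' in words and len(words) <= 2:
--             sumr = True
--     return exp and edu and sumr
-- ===== Notes on version B (the rewrite author's own statement) =====
-- stated objective: simpler
-- what changed: Replaces A's three separate filter-comprehension-plus-[0]/IndexError passes over the lines with a single loop that splits each line once and maintains three boolean flags.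
import Mathlib
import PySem

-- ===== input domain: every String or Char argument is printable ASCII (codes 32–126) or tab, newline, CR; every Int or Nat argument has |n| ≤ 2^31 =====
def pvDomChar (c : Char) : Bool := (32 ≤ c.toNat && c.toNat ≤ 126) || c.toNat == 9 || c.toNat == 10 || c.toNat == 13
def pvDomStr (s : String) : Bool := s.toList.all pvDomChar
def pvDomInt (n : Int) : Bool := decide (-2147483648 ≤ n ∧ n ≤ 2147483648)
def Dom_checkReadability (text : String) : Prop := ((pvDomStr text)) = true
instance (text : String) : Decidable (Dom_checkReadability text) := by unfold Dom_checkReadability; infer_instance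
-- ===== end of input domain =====

-- B replaces A's three filter-and-take-head passes over the lines by a single
-- traversal maintaining three flags (objective: simpler, one pass).

-- ===== PORT A =====
-- i.lower().split(" "): sep ≠ "" so split? always returns some; getD [] is unreachable
def pvWords (i : String) : List String := (PySem.Str.split? (PySem.Str.lower i) " ").getD []

-- A's three list comprehensions with `[0]` / except IndexError → False:
-- filter, map to True, take element 0, default False.
def checkReadability (text : String) : Bool :=
  let exp :=
    match PySem.List.pyGet?
      (((PySem.Str.splitlines text).filter (fun i =>
        (pvWords i).contains "experience" ||
        ((pvWords i).contains "projects" &&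
         decide ((pvWords i).length ≤ 2)))).map (fun _ => true)) 0 with
    | some b => b
    | none => false
  let edu :=
    match PySem.List.pyGet?
      (((PySem.Str.splitlines text).filter (fun i =>
        (pvWords i).contains "education" ||
        ((pvWords i).contains "certifications" &&
         decide ((pvWords i).length = 1)))).map (fun _ => true)) 0 with
    | some b => b
    | none => false
  let sumr :=
    match PySem.List.pyGet?
      (((PySem.Str.splitlines text).filter (fun i =>
        (pvWords i).contains "summary" &&
        decide ((pvWords i).length ≤ 2))).map (fun _ => true)) 0 with
    | some b => b
    | none => false
  if exp = false || edu = false || sumr = false then false else true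

-- ===== PORT B =====
-- one fold over the lines carrying three flags; words computed once per line
def checkReadability_alt (text : String) : Bool :=
  let r := (PySem.Str.splitlines text).foldl
    (fun (s : Bool × Bool × Bool) line =>
      let words := pvWords line
      ( s.1 || (words.contains "experience" || (words.contains "projects" && decide (words.length ≤ 2))),
        s.2.1 || (words.contains "education" || (words.contains "certifications" && decide (words.length = 1))),
        s.2.2 || (words.contains "summary" && decide (words.length ≤ 2)) ))
    (false, false, false)
  r.1 && r.2.1 && r.2.2

-- ===== PRECONDITION & SPEC =====
def Spec_checkReadability (text : String) (out : Bool) : Prop := out = checkReadability_alt text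
instance (text : String) (out : Bool) : Decidable (Spec_checkReadability text out) := by unfold Spec_checkReadability; infer_instance

-- ===== CLAIM (what is proved, stated in full; the proofs are below) =====
def Claim_equal_checkReadability : Prop := ∀ (text : String), Dom_checkReadability text → Spec_checkReadability text (checkReadability text)

-- ===== LEMMAS AND PROOFS =====

-- A's comprehension idiom: first True of the filtered list, default False, is `any`.
theorem pvHeadTrue (L : List String) (p : String → Bool) :
    (match PySem.List.pyGet? ((L.filter p).map (fun _ => true)) 0 with
     | some b => b
     | none => false) = L.any p := by
  cases h : L.filter p with
  | nil =>
    have ha : L.any p = false := by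
      rw [List.any_eq_false]
      exact fun x hx => List.filter_eq_nil_iff.mp h x hx
    simp [PySem.List.pyGet?, ha]
  | cons y ys =>
    have hy : y ∈ L.filter p := by rw [h]; exact List.mem_cons_self
    have ha : L.any p = true :=
      List.any_eq_true.mpr ⟨y, List.mem_of_mem_filter hy, List.of_mem_filter hy⟩
    simp [ha]

-- B's fold of three or-flags computes `any` per flag.
theorem pvFoldFlags (L : List String) (f g h : String → Bool) (a b c : Bool) :
    L.foldl (fun (s : Bool × Bool × Bool) line =>
      (s.1 || f line, s.2.1 || g line, s.2.2 || h line)) (a, b, c)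
      = (a || L.any f, b || L.any g, c || L.any h) := by
  induction L generalizing a b c with
  | nil => simp
  | cons x xs ih => simp [List.foldl_cons, ih, Bool.or_assoc]

-- ===== VERDICT (by name: the statement is the Claim_ definition above) =====
theorem checkReadability_spec : Claim_equal_checkReadability := by
  intro text _
  show checkReadability text = checkReadability_alt text
  unfold checkReadability checkReadability_alt
  rw [pvHeadTrue, pvHeadTrue, pvHeadTrue, pvFoldFlags]
  cases (PySem.Str.splitlines text).any (fun i =>
      (pvWords i).contains "experience" ||
      ((pvWords i).contains "projects" &&
       decide ((pvWords i).length ≤ 2))) <;>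
  cases (PySem.Str.splitlines text).any (fun i =>
      (pvWords i).contains "education" ||
      ((pvWords i).contains "certifications" &&
       decide ((pvWords i).length = 1))) <;>
  cases (PySem.Str.splitlines text).any (fun i =>
      (pvWords i).contains "summary" &&
      decide ((pvWords i).length ≤ 2)) <;>
  rfl
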